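-- pv_equiv track=rewrite | github.com/alexjli/terminator_public | scripts/data/preprocessing/parseTERM.py | contact_idx
-- ===== SOURCE A (Python) =====
-- def contact_idx(focus):
--     l = len(focus)
--     # if all residues are consecutive, first order TERM
--     if focus[-1] - focus[0] + 1 == l:
--         if l % 2 == 1: # if it's odd we can easily make this
--             return [i - l//2 for i in range(l)]
--         else: # if it's even we assign both center elements 0
--             tail_list = [i for i in range(l//2)]
--             head_list = [-i for i in reversed(tail_list)]
--             return head_list + tail_list
--     else: # otherwise, second order TERM
--         breakpoint = 0
--         for i in range(1, l):
--             if focus[i] - focus[i-1] != 1: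
--                 breakpoint = i
--                 break
--         first_chain = focus[:breakpoint]
--         second_chain = focus[breakpoint:]
--         return contact_idx(first_chain) + contact_idx(second_chain)
-- ===== SOURCE B (Python) =====
-- def contact_idx(focus):
--     # One linear pass: walk the list left to right, cutting off one consecutive
--     # run at a time (or the whole remaining suffix when it passes the
--     # first-order test), and emit the centered indices for each piece directly.
--     out = []
--     l = len(focus)
--     i = 0
--     while i < l:
--         if focus[-1] - focus[i] + 1 == l - i:
--             j = l  # remaining suffix is first-order: one piece to the end
--         else:
--             j = i + 1
--             while j < l and focus[j] - focus[j - 1] == 1: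
--                 j += 1
--         out.extend(_centered(j - i))
--         i = j
--     return out
--
--
-- def _centered(n):
--     h = n // 2
--     if n % 2 == 1:
--         return list(range(-h, h + 1))
--     else:
--         return list(range(1 - h, 1)) + list(range(h))
-- ===== Notes on version B (the rewrite author's own statement) =====
-- stated objective: faster
-- what changed: Replaces A's recursive split-and-slice (which recomputes the breakpoint scan and copies both slices at every level) by one iterative left-to-right pass over indices that cuts off one consecutive run at a time and emits its centered indices directly, with no slicing and no recursion.
import Mathlib
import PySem

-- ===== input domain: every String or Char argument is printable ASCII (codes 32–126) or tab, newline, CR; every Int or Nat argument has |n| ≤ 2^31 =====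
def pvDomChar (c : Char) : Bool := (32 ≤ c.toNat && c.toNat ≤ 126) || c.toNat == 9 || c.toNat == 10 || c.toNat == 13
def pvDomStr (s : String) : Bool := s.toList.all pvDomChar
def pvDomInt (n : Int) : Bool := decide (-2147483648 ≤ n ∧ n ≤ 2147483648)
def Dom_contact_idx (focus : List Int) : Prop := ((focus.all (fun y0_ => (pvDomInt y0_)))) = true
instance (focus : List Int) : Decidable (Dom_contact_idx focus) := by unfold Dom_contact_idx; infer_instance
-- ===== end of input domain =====

-- B replaces A's recursive split-and-slice by one iterative left-to-right pass over
-- indices (no slicing, no recursion); equivalence is proved on nonempty lists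
-- (A raises IndexError on [], where B returns []).

-- ===== PORT A =====
-- A's breakpoint loop: 'for i in range(1, l): if focus[i]-focus[i-1] != 1: breakpoint = i; break'
-- (breakpoint stays 0 if no break is found).  All indices i, i-1 are in range here,
-- so Python's focus[i] is exactly List.getD.
def bpScanA (focus : List Int) (i : Nat) : Nat :=
  if i < focus.length then
    if focus.getD i 0 - focus.getD (i-1) 0 ≠ 1 then i
    else bpScanA focus (i+1)
  else 0
termination_by focus.length - i

-- A's first-order branch; l = len(focus) ≥ 0, so Python's l // 2 and l % 2 are
-- exactly Nat division and Nat mod.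
def firstOrderA (l : Nat) : List Int :=
  if l % 2 = 1 then
    (PySem.List.pyRange 0 (l : Int) 1).map (fun i => i - ((l / 2 : Nat) : Int))
  else
    let tail := PySem.List.pyRange 0 ((l / 2 : Nat) : Int) 1
    let head := tail.reverse.map (fun i => -i)
    head ++ tail

-- A with a fuel parameter making the recursion structural; contact_idx passes
-- fuel = len(focus), which the proofs show is never exhausted on nonempty input.
def contactA : Nat → List Int → List Int
  | 0, _ => []
  | fuel+1, focus =>
    if focus.length = 0 then []  -- Python raises IndexError reading the last element; excluded by Pre_
    else
      -- Python reads the last and the first element here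
      if PySem.List.pyGetD focus (-1) 0 - focus.getD 0 0 + 1 = (focus.length : Int) then
        firstOrderA focus.length
      else
        -- breakpoint = bpScanA focus 1, substituted into the two slices focus[:bp], focus[bp:]
        contactA fuel (PySem.List.slice focus none (some ((bpScanA focus 1) : Int))) ++
        contactA fuel (PySem.List.slice focus (some ((bpScanA focus 1) : Int)) none)

def contact_idx (focus : List Int) : List Int := contactA focus.length focus

-- ===== PORT B =====
-- inner while: 'while j < l and focus[j] - focus[j-1] == 1: j += 1' (j ≥ 1 throughout,
-- indices in range, so Python's focus[j] is List.getD)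
def runEnd (focus : List Int) (j : Nat) : Nat :=
  if j < focus.length ∧ focus.getD j 0 - focus.getD (j-1) 0 = 1 then
    runEnd focus (j+1)
  else j
termination_by focus.length - j

-- the port of bLoop below cites this for termination
theorem le_runEnd (focus : List Int) (j : Nat) : j ≤ runEnd focus j := by
  unfold runEnd
  split
  · have := le_runEnd focus (j+1); omega
  · exact Nat.le_refl j
termination_by focus.length - j
decreasing_by omega

-- _centered(n); n ≥ 0 so Python's n // 2 is Nat division
def centeredB (n : Nat) : List Int :=
  if n % 2 = 1 then
    PySem.List.pyRange (-((n / 2 : Nat) : Int)) (((n / 2 : Nat) : Int) + 1) 1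
  else
    PySem.List.pyRange (1 - ((n / 2 : Nat) : Int)) 1 1 ++
    PySem.List.pyRange 0 ((n / 2 : Nat) : Int) 1

-- the outer while loop, with the loop-local 'j' substituted into the two places it is used
def bLoop (focus : List Int) (lastv : Int) (i : Nat) : List Int :=
  if i < focus.length then
    if lastv - focus.getD i 0 + 1 = (focus.length : Int) - (i : Int) then
      centeredB (focus.length - i) ++ bLoop focus lastv focus.length
    else
      centeredB (runEnd focus (i+1) - i) ++ bLoop focus lastv (runEnd focus (i+1))
  else []
termination_by focus.length - i
decreasing_by
  · omega
  · have := le_runEnd focus (i+1); omega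

def contact_idx_alt (focus : List Int) : List Int :=
  -- the last element is only read inside the loop, where i < len(focus) guarantees nonemptiness
  bLoop focus (PySem.List.pyGetD focus (-1) 0) 0

-- ===== PRECONDITION & SPEC =====
-- A unconditionally reads the last element of focus, so it raises IndexError on the empty list.
def Pre_contact_idx (focus : List Int) : Prop := focus ≠ []
instance (focus : List Int) : Decidable (Pre_contact_idx focus) := by unfold Pre_contact_idx; infer_instance
def pvWitness_contact_idx : List Int := ([1, 2, 7])

def Spec_contact_idx (focus : List Int) (out : List Int) : Prop := out = contact_idx_alt focus
instance (focus : List Int) (out : List Int) : Decidable (Spec_contact_idx focus out) := by unfold Spec_contact_idx; infer_instance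

-- ===== CLAIM (what is proved, stated in full; the proofs are below) =====
def Claim_equal_contact_idx : Prop := ∀ (focus : List Int), Dom_contact_idx focus → Pre_contact_idx focus → Spec_contact_idx focus (contact_idx focus)

-- ===== LEMMAS AND PROOFS =====

theorem getD_drop' (xs : List Int) (i k : Nat) (d : Int) :
    (xs.drop i).getD k d = xs.getD (i+k) d := by
  simp [List.getD_eq_getElem?_getD, List.getElem?_drop]

theorem getD_take' (xs : List Int) (n k : Nat) (d : Int) (h : k < n) :
    (xs.take n).getD k d = xs.getD k d := by
  simp [List.getD_eq_getElem?_getD, h]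

-- range(a,b) shifted by c
theorem pyRange_map_add (a b c : Int) :
    (PySem.List.pyRange a b 1).map (fun x => x + c) = PySem.List.pyRange (a + c) (b + c) 1 := by
  rw [PySem.List.pyRange_one, PySem.List.pyRange_one, List.map_map]
  have hbc : b + c - (a + c) = b - a := by ring
  rw [hbc]
  refine List.map_congr_left (fun k _ => ?_)
  simp [Function.comp]; ring

-- head_list = [-i for i in reversed(range(h))] is range(1-h, 1)
theorem rev_neg_range (h : Int) :
    ((PySem.List.pyRange 0 h 1).reverse).map (fun i => -i) = PySem.List.pyRange (1 - h) 1 1 := by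
  have h1 : PySem.List.pyRange (h-1) (-1) (-1) = (PySem.List.pyRange 0 h 1).reverse := by
    have := PySem.List.pyRange_neg_one_eq_reverse (h-1) (-1)
    norm_num at this
    exact this
  rw [← h1, PySem.List.pyRange_neg_one, PySem.List.pyRange_one, List.map_map]
  have e1 : h - 1 - (-1) = h := by ring
  have e2 : (1 : Int) - (1 - h) = h := by ring
  rw [e1, e2]
  refine List.map_congr_left (fun k _ => ?_)
  simp [Function.comp]; ring

-- A's first-order branch and B's _centered agree (both depend only on the length)
theorem firstOrderA_eq_centeredB (n : Nat) : firstOrderA n = centeredB n := by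
  unfold firstOrderA centeredB
  by_cases hodd : n % 2 = 1
  · rw [if_pos hodd, if_pos hodd]
    have hf : (fun i : Int => i - ((n / 2 : Nat) : Int)) = fun i => i + (-((n / 2 : Nat) : Int)) := by
      funext i; ring
    rw [hf, pyRange_map_add]
    have e1 : (0 : Int) + -((n / 2 : Nat) : Int) = -((n / 2 : Nat) : Int) := by ring
    have e2 : (n : Int) + -((n / 2 : Nat) : Int) = ((n / 2 : Nat) : Int) + 1 := by omega
    rw [e1, e2]
  · rw [if_neg hodd, if_neg hodd]
    simp only []
    rw [rev_neg_range]

theorem runEnd_le (focus : List Int) (j : Nat) (h : j ≤ focus.length) :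
    runEnd focus j ≤ focus.length := by
  unfold runEnd
  split_ifs with hc
  · exact runEnd_le focus (j+1) (by omega)
  · exact h
termination_by focus.length - j
decreasing_by omega

theorem runEnd_consec (focus : List Int) (j : Nat) :
    ∀ m, j ≤ m → m < runEnd focus j → focus.getD m 0 - focus.getD (m-1) 0 = 1 := by
  intro m h1 h2
  rw [runEnd] at h2
  split_ifs at h2 with hc
  · rcases Nat.eq_or_lt_of_le h1 with rfl | hlt
    · exact hc.2
    · exact runEnd_consec focus (j+1) m hlt h2
  · omega
termination_by focus.length - j
decreasing_by omega

-- telescoping a segment of unit steps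
theorem telescope (focus : List Int) :
    ∀ (k i : Nat), i + k < focus.length →
      (∀ m, i < m → m ≤ i + k → focus.getD m 0 - focus.getD (m-1) 0 = 1) →
      focus.getD (i + k) 0 - focus.getD i 0 = (k : Int) := by
  intro k
  induction k with
  | zero => intro i _ _; simp
  | succ k ih =>
    intro i hik hdiff
    have h1 := hdiff (i+k+1) (by omega) (by omega)
    have h2 := ih i (by omega) (fun m hm1 hm2 => hdiff m hm1 (by omega))
    have e1 : i + (k+1) = i + k + 1 := by omega
    have e2 : i + k + 1 - 1 = i + k := by omega
    rw [e1]
    rw [e2] at h1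
    push_cast
    omega

-- A's breakpoint scan on the suffix focus[i:] vs B's absolute runEnd
theorem scanRel (focus : List Int) (i : Nat) :
    ∀ (n k : Nat), focus.length - (i + k) ≤ n → 1 ≤ k → i + k ≤ focus.length →
      bpScanA (focus.drop i) k =
        if runEnd focus (i + k) < focus.length then runEnd focus (i + k) - i else 0 := by
  intro n
  induction n with
  | zero =>
    intro k h1 _ h3
    rw [bpScanA]
    simp only [List.length_drop]
    rw [if_neg (by omega)]
    have hr : runEnd focus (i+k) = i+k := by
      rw [runEnd, if_neg]
      intro hcc; omega
    rw [hr, if_neg (by omega)]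
  | succ n ih =>
    intro k h1 h2 h3
    rw [bpScanA]
    simp only [List.length_drop]
    have e1 : (focus.drop i).getD k 0 = focus.getD (i+k) 0 := getD_drop' ..
    have e2 : (focus.drop i).getD (k-1) 0 = focus.getD (i+k-1) 0 := by
      rw [getD_drop']; congr 1; omega
    by_cases hk : i + k < focus.length
    · rw [if_pos (by omega), e1, e2]
      by_cases hd : focus.getD (i+k) 0 - focus.getD (i+k-1) 0 = 1
      · rw [if_neg (not_not_intro hd)]
        have hre : runEnd focus (i+k) = runEnd focus (i+k+1) := by
          rw [runEnd, if_pos ⟨hk, hd⟩]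
        have hih := ih (k+1) (by omega) (by omega) (by omega)
        rw [show i + (k+1) = i + k + 1 from by omega] at hih
        rw [hih, hre]
      · rw [if_pos hd]
        have hre : runEnd focus (i+k) = i+k := by
          rw [runEnd, if_neg]
          intro hcc; exact hd hcc.2
        rw [hre, if_pos hk]
        omega
    · rw [if_neg (by omega)]
      have hr : runEnd focus (i+k) = i+k := by
        rw [runEnd, if_neg]
        intro hcc; omega
      rw [hr, if_neg (by omega)]

-- a nonempty list whose adjacent differences are all 1 takes A's first-order branch
theorem consecFirst (f : Nat) (s : List Int) (hf : 1 ≤ f) (hs : s ≠ [])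
    (hc : ∀ k, 1 ≤ k → k < s.length → s.getD k 0 - s.getD (k-1) 0 = 1) :
    contactA f s = centeredB s.length := by
  obtain ⟨f', rfl⟩ : ∃ f', f = f' + 1 := ⟨f - 1, by omega⟩
  have hL : 0 < s.length := List.length_pos_iff.mpr hs
  rw [contactA]
  rw [if_neg (by omega)]
  have hlast : PySem.List.pyGetD s (-1) 0 = s.getD (s.length - 1) 0 := by
    rw [PySem.List.pyGetD_neg_one s 0 hs, List.getLast_eq_getElem,
        List.getD_eq_getElem s 0 (by omega)]
  have htel := telescope s (s.length - 1) 0 (by omega)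
    (fun m hm1 hm2 => by simpa using hc m (by omega) (by omega))
  simp only [Nat.zero_add] at htel
  rw [if_pos]
  · exact firstOrderA_eq_centeredB s.length
  · rw [hlast]
    omega

-- the main bridge: B's loop at index i computes A on the suffix focus[i:]
theorem bridge (focus : List Int) (lastv : Int)
    (hl : lastv = focus.getD (focus.length - 1) 0) :
    ∀ (n i fuel : Nat), focus.length - i ≤ n → i < focus.length →
      focus.length - i ≤ fuel →
      bLoop focus lastv i = contactA fuel (focus.drop i) := by
  intro n
  induction n with
  | zero => intro i fuel h1 h2 _; omega
  | succ n ih =>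
    intro i fuel hn hi hfuel
    obtain ⟨f, rfl⟩ : ∃ f, fuel = f + 1 := ⟨fuel - 1, by omega⟩
    have hlen : (focus.drop i).length = focus.length - i := by simp
    have hdne : focus.drop i ≠ [] := by
      intro h
      have := congrArg List.length h
      simp at this
      omega
    have hlast : PySem.List.pyGetD (focus.drop i) (-1) 0 = lastv := by
      rw [PySem.List.pyGetD_neg_one _ 0 hdne, List.getLast_eq_getElem, hl,
          ← List.getD_eq_getElem (focus.drop i) 0 (by omega), getD_drop']
      congr 1
      simp only [List.length_drop]
      omega
    have hfirst : (focus.drop i).getD 0 0 = focus.getD i 0 := by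
      rw [getD_drop']
      congr 1
    rw [bLoop, if_pos hi, contactA,
        if_neg (show ¬(focus.drop i).length = 0 by simp only [hlen]; omega),
        hlast, hfirst, hlen]
    by_cases hc : lastv - focus.getD i 0 + 1 = (focus.length : Int) - (i : Int)
    · rw [if_pos hc, if_pos (by omega)]
      rw [firstOrderA_eq_centeredB]
      have hstop : bLoop focus lastv focus.length = [] := by
        rw [bLoop]; simp
      rw [hstop, List.append_nil]
    · rw [if_neg hc, if_neg (by intro h; exact hc (by omega))]
      have he1 : i + 1 ≤ runEnd focus (i+1) := le_runEnd focus (i+1)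
      have he2 : runEnd focus (i+1) ≤ focus.length := runEnd_le focus (i+1) (by omega)
      have heL : runEnd focus (i+1) < focus.length := by
        rcases Nat.lt_or_ge (runEnd focus (i+1)) focus.length with h | h
        · exact h
        · exfalso
          have htel := telescope focus (focus.length - 1 - i) i (by omega)
            (fun m hm1 hm2 => runEnd_consec focus (i+1) m (by omega) (by omega))
          apply hc
          rw [hl]
          have e : i + (focus.length - 1 - i) = focus.length - 1 := by omega
          rw [e] at htel
          omega
      have hbp : bpScanA (focus.drop i) 1 = runEnd focus (i+1) - i := by
        have h := scanRel focus i focus.length 1 (by omega) (Nat.le_refl 1) (by omega)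
        rw [h, if_pos heL]
      rw [hbp, PySem.List.slice_to_natCast, PySem.List.slice_from_natCast]
      have hdd : (focus.drop i).drop (runEnd focus (i+1) - i) = focus.drop (runEnd focus (i+1)) := by
        rw [List.drop_drop]
        congr 1
        omega
      rw [hdd]
      have hlent : ((focus.drop i).take (runEnd focus (i+1) - i)).length
          = runEnd focus (i+1) - i := by
        simp only [List.length_take, hlen]
        omega
      have hrun : contactA f ((focus.drop i).take (runEnd focus (i+1) - i))
          = centeredB (runEnd focus (i+1) - i) := by
        have hne : (focus.drop i).take (runEnd focus (i+1) - i) ≠ [] := by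
          intro h
          have := congrArg List.length h
          rw [hlent] at this
          simp at this
          omega
        have hdiffs : ∀ k, 1 ≤ k → k < ((focus.drop i).take (runEnd focus (i+1) - i)).length →
            ((focus.drop i).take (runEnd focus (i+1) - i)).getD k 0
              - ((focus.drop i).take (runEnd focus (i+1) - i)).getD (k-1) 0 = 1 := by
          intro k hk1 hk2
          rw [hlent] at hk2
          rw [getD_take' _ _ _ _ hk2, getD_take' _ _ _ _ (by omega), getD_drop', getD_drop']
          have e : i + (k-1) = i + k - 1 := by omega
          rw [e]
          exact runEnd_consec focus (i+1) (i+k) (by omega) (by omega)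
        have h := consecFirst f _ (by omega) hne hdiffs
        rw [hlent] at h
        exact h
      rw [hrun]
      have hrec := ih (runEnd focus (i+1)) f (by omega) heL (by omega)
      rw [← hrec]

-- ===== VERDICT =====
theorem contact_idx_spec : Claim_equal_contact_idx := by
  intro focus _ hpre
  unfold Spec_contact_idx contact_idx contact_idx_alt
  have hL : 0 < focus.length := List.length_pos_iff.mpr hpre
  have hlast : PySem.List.pyGetD focus (-1) 0 = focus.getD (focus.length - 1) 0 := by
    rw [PySem.List.pyGetD_neg_one focus 0 hpre, List.getLast_eq_getElem,
        List.getD_eq_getElem focus 0 (by omega)]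
  rw [hlast]
  have h := bridge focus _ rfl focus.length 0 focus.length (by omega) hL (by omega)
  rw [List.drop_zero] at h
  exact h.symm
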